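-- pv_equiv track=rewrite | github.com/kcyu2014/eval-nas | visualization/nips_rebuttal_data.py | clean_arch_pool_with_performance
-- ===== SOURCE A (Python) =====
-- def clean_arch_pool_with_performance(pool, perf):
--     new_arch_pool = dict()
--     new_arch_perf = dict()
--     for a, p in zip(pool, perf):
--         if a not in new_arch_pool.keys():
--             new_arch_pool[a] = 1
--             new_arch_perf[a] = [p]
--         else:
--             new_arch_pool[a] += 1
--             new_arch_perf[a].append(p)
--     return new_arch_pool, new_arch_perf
-- ===== SOURCE B (Python) =====
-- def clean_arch_pool_with_performance(pool, perf):
--     pairs = list(zip(pool, perf))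
--     order = list(dict.fromkeys(a for a, _ in pairs))
--     new_arch_pool = {a: sum(1 for x, _ in pairs if x == a) for a in order}
--     new_arch_perf = {a: [p for x, p in pairs if x == a] for a in order}
--     return new_arch_pool, new_arch_perf
-- ===== Notes on version B (the rewrite author's own statement) =====
-- stated objective: alternative
-- what changed: B replaces A's single-pass maintenance of two parallel dicts (if/else insert-or-update per element) by a dedup-then-gather strategy: first the distinct archs in first-occurrence order via dict.fromkeys, then for each distinct arch a full scan of the zipped pairs to count occurrences and to collect its performances; it trades O(n) for O(n*k) nested scans in exchange for no incrementally maintained state.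
import Mathlib
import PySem

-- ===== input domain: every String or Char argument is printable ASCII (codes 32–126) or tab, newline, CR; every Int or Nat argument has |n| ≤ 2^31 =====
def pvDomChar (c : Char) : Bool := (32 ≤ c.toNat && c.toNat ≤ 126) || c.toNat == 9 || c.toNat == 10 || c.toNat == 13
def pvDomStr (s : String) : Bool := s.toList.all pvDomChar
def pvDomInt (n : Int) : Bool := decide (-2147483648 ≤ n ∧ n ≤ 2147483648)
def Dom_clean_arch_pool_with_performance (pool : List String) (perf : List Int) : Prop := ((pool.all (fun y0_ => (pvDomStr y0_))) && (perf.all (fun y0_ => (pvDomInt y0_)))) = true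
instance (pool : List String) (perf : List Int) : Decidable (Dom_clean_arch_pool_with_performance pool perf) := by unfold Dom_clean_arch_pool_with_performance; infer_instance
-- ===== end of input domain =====

-- B replaces A's single-pass maintenance of two parallel dicts by dedup-then-gather: distinct
-- archs in first-occurrence order, then one full scan of the pairs per distinct arch to count
-- it and to collect its performances; objective: alternative (no maintained state, nested scans).

-- ===== PORT A =====
-- loop body of A: updates both dicts, branching on membership in the count dict
def pvStepA (st : PySem.Dict String Int × PySem.Dict String (List Int)) (ap : String × Int) :
    PySem.Dict String Int × PySem.Dict String (List Int) :=
  if st.1.contains ap.1 = false then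
    (st.1.insert ap.1 1, st.2.insert ap.1 [ap.2])
  else
    (st.1.modify ap.1 0 (· + 1), st.2.modify ap.1 [] (· ++ [ap.2]))

def clean_arch_pool_with_performance (pool : List String) (perf : List Int) :
    (List (String × Int)) × (List (String × List Int)) :=
  let st := (pool.zip perf).foldl pvStepA (PySem.Dict.empty, PySem.Dict.empty)
  (st.1.items, st.2.items)

-- ===== PORT B =====
def clean_arch_pool_with_performance_alt (pool : List String) (perf : List Int) :
    (List (String × Int)) × (List (String × List Int)) :=
  let pairs := pool.zip perf
  let order := PySem.List.dedup (pairs.map Prod.fst)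
  (order.map (fun a => (a, ((pairs.countP (fun x => x.1 == a)) : Int))),
   order.map (fun a => (a, (pairs.filter (fun x => x.1 == a)).map Prod.snd)))

-- ===== PRECONDITION & SPEC =====
def Spec_clean_arch_pool_with_performance (pool : List String) (perf : List Int) (out : (List (String × Int)) × (List (String × List Int))) : Prop := out = clean_arch_pool_with_performance_alt pool perf
instance (pool : List String) (perf : List Int) (out : (List (String × Int)) × (List (String × List Int))) : Decidable (Spec_clean_arch_pool_with_performance pool perf out) := by unfold Spec_clean_arch_pool_with_performance; infer_instance

-- ===== CLAIM (what is proved, stated in full; the proofs are below) =====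
def Claim_equal_clean_arch_pool_with_performance : Prop := ∀ (pool : List String) (perf : List Int), Dom_clean_arch_pool_with_performance pool perf → Spec_clean_arch_pool_with_performance pool perf (clean_arch_pool_with_performance pool perf)

-- ===== LEMMAS AND PROOFS =====

-- A's branch collapses: both arms are the corresponding unconditional modify,
-- provided the two dicts agree on membership of the current key.
theorem pv_stepA_eq_modify (d1 : PySem.Dict String Int) (d2 : PySem.Dict String (List Int))
    (a : String) (p : Int) (h : d1.contains a = d2.contains a) :
    pvStepA (d1, d2) (a, p) = (d1.modify a 0 (· + 1), d2.modify a [] (· ++ [p])) := by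
  by_cases hc : d1.contains a = false
  · have hc2 : d2.contains a = false := h ▸ hc
    simp [pvStepA, hc, PySem.Dict.modify, PySem.Dict.getD_of_not_contains, hc2]
  · simp [pvStepA, hc]

-- A's paired fold splits into the two unconditional modify-folds.
theorem pv_foldA_split (zs : List (String × Int)) :
    ∀ (d1 : PySem.Dict String Int) (d2 : PySem.Dict String (List Int)),
      (∀ a, d1.contains a = d2.contains a) →
      zs.foldl pvStepA (d1, d2)
        = ((zs.map Prod.fst).foldl (fun d x => d.modify x 0 (· + 1)) d1,
           zs.foldl (fun d p => d.modify p.1 [] (· ++ [p.2])) d2) := by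
  induction zs with
  | nil => intro d1 d2 _; rfl
  | cons z zs ih =>
      intro d1 d2 h
      obtain ⟨a, p⟩ := z
      rw [List.foldl_cons, pv_stepA_eq_modify d1 d2 a p (h a)]
      rw [List.map_cons, List.foldl_cons, List.foldl_cons]
      exact ih _ _ (fun a' => by
        rw [PySem.Dict.contains_modify, PySem.Dict.contains_modify, h a'])

-- counting a key among the firsts of the pairs is countP on the pairs
theorem pv_count_firsts (zs : List (String × Int)) (a : String) :
    (zs.map Prod.fst).count a = zs.countP (fun x => x.1 == a) := by
  rw [List.count, List.countP_map]
  rfl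

-- ===== VERDICT (by name: the statement is the Claim_ definition above) =====
theorem clean_arch_pool_with_performance_spec : Claim_equal_clean_arch_pool_with_performance := by
  intro pool perf _
  unfold Spec_clean_arch_pool_with_performance
  simp only [clean_arch_pool_with_performance, clean_arch_pool_with_performance_alt]
  set zs := pool.zip perf with hzs
  rw [pv_foldA_split zs PySem.Dict.empty PySem.Dict.empty (fun a => rfl)]
  -- first component: A's count dict is the Counter of the firsts
  have h1 : ((zs.map Prod.fst).foldl (fun d x => d.modify x 0 (· + 1)) PySem.Dict.empty).items
      = (PySem.List.dedup (zs.map Prod.fst)).map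
          (fun a => (a, ((zs.countP (fun x => x.1 == a)) : Int))) := by
    rw [show (zs.map Prod.fst).foldl (fun d x => d.modify x 0 (· + 1)) PySem.Dict.empty
          = PySem.Dict.counter (zs.map Prod.fst) from rfl]
    rw [PySem.Dict.items_counter]
    simp only [PySem.List.dedup_eq_ofList]
    exact List.map_congr_left (fun a _ => by rw [pv_count_firsts])
  -- second component: A's perf dict, via keys + getD
  have h2 : (zs.foldl (fun d p => d.modify p.1 [] (· ++ [p.2]))
        (PySem.Dict.empty : PySem.Dict String (List Int))).items
      = (PySem.List.dedup (zs.map Prod.fst)).map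
          (fun a => (a, (zs.filter (fun x => x.1 == a)).map Prod.snd)) := by
    set G := zs.foldl (fun d p => d.modify p.1 [] (· ++ [p.2]))
        (PySem.Dict.empty : PySem.Dict String (List Int)) with hG
    have hkeys : G.keys = PySem.List.dedup (zs.map Prod.fst) := by
      rw [hG, PySem.Dict.keys_foldl_modify_key, PySem.Dict.keys_empty,
        PySem.List.dedup_eq_ofList]
      rfl
    have hnd : G.keys.Nodup := by
      rw [hkeys]; exact PySem.List.nodup_dedup _
    rw [PySem.Dict.items_eq_map_keys G hnd [], hkeys]
    exact List.map_congr_left (fun a _ => by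
      rw [hG, PySem.Dict.getD_foldl_modify_append, PySem.Dict.getD_empty]
      rfl)
  rw [h1, h2]
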